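-- pv_equiv track=rewrite | github.com/ng3rdstmadgke/PyPractice | 19_nabeatu/nabeatu.py | nabeatu
-- ===== SOURCE A (Python) =====
-- def nabeatu(n):
--     ret = []
--     for i in range(1, n+1):
--         if i % 3 == 0:
--             ret.append("Aho")
--         elif "3" in str(i):
--             ret.append("Aho")
--         else:
--             ret.append(str(i))
--     return ret
-- ===== SOURCE B (Python) =====
-- def nabeatu(n):
--     # staged sieve: build all labels first, then overwrite multiples of 3 by
--     # stride-stepping (no division), then overwrite entries whose digits contain 3
--     out = [str(i) for i in range(1, n + 1)]
--     for j in range(2, n, 3):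
--         out[j] = "Aho"
--     for k, s in enumerate(out):
--         if "3" in s:
--             out[k] = "Aho"
--     return out
-- ===== Notes on version B (the rewrite author's own statement) =====
-- stated objective: alternative
-- what changed: A labels each i in one pass with an if/elif chain testing i % 3 and '3' in str(i); B is a three-stage sieve: it first materialises str(i) for all i, then overwrites every third slot by stride-stepping range(2, n, 3) with no per-element divisibility test, then overwrites the remaining entries whose string contains '3'.
import Mathlib
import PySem

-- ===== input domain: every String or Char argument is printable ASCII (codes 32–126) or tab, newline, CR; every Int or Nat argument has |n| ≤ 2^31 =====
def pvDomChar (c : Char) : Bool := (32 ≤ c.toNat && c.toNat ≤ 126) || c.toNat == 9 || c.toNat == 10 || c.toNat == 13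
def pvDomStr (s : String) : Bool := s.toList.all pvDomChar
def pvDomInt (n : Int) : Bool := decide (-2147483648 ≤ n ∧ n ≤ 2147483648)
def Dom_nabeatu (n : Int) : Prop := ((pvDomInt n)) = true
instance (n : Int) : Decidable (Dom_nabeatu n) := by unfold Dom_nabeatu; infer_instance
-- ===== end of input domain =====

-- B replaces A's single per-element if/elif pass by a three-stage sieve: build all str(i),
-- stride-overwrite every third slot, then overwrite entries containing '3' (objective: alternative).

-- ===== PORT A =====
def nabeatu (n : Int) : List String :=
  (PySem.List.pyRange 1 (n + 1) 1).foldl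
    (fun ret i =>
      if PySem.Int.mod i 3 = 0 then ret ++ ["Aho"]
      else if PySem.Str.isIn "3" (PySem.Int.toStr i) then ret ++ ["Aho"]
      else ret ++ [PySem.Int.toStr i]) []

-- ===== PORT B =====
-- out = [str(i) for i in range(1, n+1)]
-- for j in range(2, n, 3): out[j] = "Aho"        -- out[j] with 0 ≤ j < len(out): List.set j.toNat is exact
-- for k, s in enumerate(out): if "3" in s: out[k] = "Aho"
--   each slot is written (with a value not containing '3') only after it is read, so this
--   in-place overwrite loop is exactly a pointwise map over the current list
def nabeatu_alt (n : Int) : List String :=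
  let out0 := (PySem.List.pyRange 1 (n + 1) 1).map PySem.Int.toStr
  let out1 := (PySem.List.pyRange 2 n 3).foldl (fun o j => o.set j.toNat "Aho") out0
  out1.map (fun s => if PySem.Str.isIn "3" s then "Aho" else s)

-- ===== PRECONDITION & SPEC =====
def Spec_nabeatu (n : Int) (out : List String) : Prop := out = nabeatu_alt n
instance (n : Int) (out : List String) : Decidable (Spec_nabeatu n out) := by unfold Spec_nabeatu; infer_instance

-- ===== CLAIM (what is proved, stated in full; the proofs are below) =====
def Claim_equal_nabeatu : Prop := ∀ (n : Int), Dom_nabeatu n → Spec_nabeatu n (nabeatu n)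

-- ===== LEMMAS AND PROOFS =====

theorem getElem?_foldl_set (l : List Int) (init : List String) (k : Nat) :
    (l.foldl (fun o j => o.set j.toNat "Aho") init)[k]? =
      if (∃ j ∈ l, j.toNat = k) ∧ k < init.length then some "Aho" else init[k]? := by
  induction l generalizing init with
  | nil => simp
  | cons j l ih =>
    rw [List.foldl_cons, ih (init.set j.toNat "Aho")]
    simp only [List.length_set, List.getElem?_set, List.mem_cons]
    by_cases hex : ∃ j' ∈ l, j'.toNat = k
    · by_cases hk : k < init.length <;> simp_all
    · by_cases hj : j.toNat = k
      · by_cases hk : k < init.length <;> simp_all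
      · simp_all

theorem sieve_eq_map (n : Int) :
    (PySem.List.pyRange 2 n 3).foldl (fun o j => o.set j.toNat "Aho")
        ((PySem.List.pyRange 1 (n + 1) 1).map PySem.Int.toStr)
      = (PySem.List.pyRange 1 (n + 1) 1).map
          (fun i => if PySem.Int.mod i 3 = 0 then "Aho" else PySem.Int.toStr i) := by
  apply List.ext_getElem?
  intro k
  rw [getElem?_foldl_set]
  have hlen : ((PySem.List.pyRange 1 (n + 1) 1).map PySem.Int.toStr).length = (n : Int).toNat := by
    simp [PySem.List.length_pyRange_one]
  by_cases hk : k < (n : Int).toNat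
  · have hk' : k < (PySem.List.pyRange 1 (n + 1) 1).length := by
      simp [PySem.List.length_pyRange_one]; omega
    have hget : (PySem.List.pyRange 1 (n + 1) 1)[k] = 1 + (k : Int) :=
      PySem.List.getElem_pyRange_one (h := hk')
    have hmem : ((∃ j ∈ PySem.List.pyRange 2 n 3, j.toNat = k) ↔ (3 : Int) ∣ (1 + (k : Int))) := by
      constructor
      · rintro ⟨j, hj, rfl⟩
        rw [PySem.List.mem_pyRange_iff_of_pos (by omega)] at hj
        obtain ⟨h2, hn, hd⟩ := hj
        obtain ⟨c, hc⟩ := hd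
        exact ⟨c + 1, by omega⟩
      · rintro ⟨c, hc⟩
        refine ⟨(k : Int), ?_, by omega⟩
        rw [PySem.List.mem_pyRange_iff_of_pos (by omega)]
        refine ⟨by omega, by omega, ⟨c - 1, by omega⟩⟩
    rw [List.getElem?_map, List.getElem?_map, List.getElem?_eq_getElem hk', hget]
    simp only [Option.map_some]
    have hdvd : PySem.Int.mod (1 + (k : Int)) 3 = 0 ↔ (3 : Int) ∣ (1 + (k : Int)) :=
      PySem.Int.mod_eq_zero_iff_dvd _ _
    by_cases hd : (3 : Int) ∣ (1 + (k : Int))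
    · rw [if_pos ⟨hmem.mpr hd, by omega⟩, if_pos (hdvd.mpr hd)]
    · rw [if_neg (fun h => hd (hmem.mp h.1)), if_neg (fun h => hd (hdvd.mp h))]
  · have h1 : ¬ ((∃ j ∈ PySem.List.pyRange 2 n 3, j.toNat = k) ∧
        k < ((PySem.List.pyRange 1 (n + 1) 1).map PySem.Int.toStr).length) := by
      rw [hlen]; intro h; omega
    rw [if_neg h1, List.getElem?_map, List.getElem?_map]
    have : (PySem.List.pyRange 1 (n + 1) 1)[k]? = none := by
      rw [List.getElem?_eq_none_iff]; simp [PySem.List.length_pyRange_one]; omega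
    rw [this]; rfl

-- ===== VERDICT (by name: the statement is the Claim_ definition above) =====
theorem nabeatu_spec : Claim_equal_nabeatu := by
  intro n _
  unfold Spec_nabeatu nabeatu nabeatu_alt
  have hbody : (fun (ret : List String) (i : Int) =>
      if PySem.Int.mod i 3 = 0 then ret ++ ["Aho"]
      else if PySem.Str.isIn "3" (PySem.Int.toStr i) then ret ++ ["Aho"]
      else ret ++ [PySem.Int.toStr i])
      = fun (ret : List String) (i : Int) => ret ++
          [if PySem.Int.mod i 3 = 0 then "Aho"
           else if PySem.Str.isIn "3" (PySem.Int.toStr i) then "Aho"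
           else PySem.Int.toStr i] := by
    funext ret i; split_ifs <;> rfl
  rw [hbody, PySem.List.foldl_append_singleton_eq_map, List.nil_append]
  simp only [sieve_eq_map, List.map_map]
  apply List.map_congr_left
  intro i _
  simp only [Function.comp_apply]
  by_cases h3 : PySem.Int.mod i 3 = 0
  · rw [if_pos h3, if_pos h3]
    simp
  · rw [if_neg h3, if_neg h3]
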